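-- pv_equiv track=rewrite | github.com/nami4mo/competitive-programming-problems | algo_contest/previous/abc178/f_stress_test_template.py | solve_comp
-- ===== SOURCE A (Python) =====
-- from itertools import permutations
--
-- def solve_comp(n,al,bl):
--     ll = list(range(1,n+1))  # list of elements
--     perml = list(permutations(bl, n))
--     for perm in perml:
--         l = list(perm)
--         for i in range(n):
--             if al[i] == l[i]: break
--         else:
--             return ('Yes', l)
--     else:
--         return ('No', [])
-- ===== SOURCE B (Python) =====
-- def solve_comp(n, al, bl):
--     # Backtracking over bl's indices instead of materialising all permutations.
--     m = len(bl)
--     if n > m: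
--         return ('No', [])
--     used = [False] * m
--     acc = []
--     def dfs(i):
--         if i == n:
--             return True
--         for j in range(m):
--             if not used[j] and bl[j] != al[i]:
--                 used[j] = True
--                 acc.append(bl[j])
--                 if dfs(i + 1):
--                     return True
--                 acc.pop()
--                 used[j] = False
--         return False
--     return ('Yes', acc) if dfs(0) else ('No', [])
-- ===== Notes on version B (the rewrite author's own statement) =====
-- stated objective: faster
-- what changed: Replaces materialising the full list(permutations(bl, n)) and testing each tuple with a recursive backtracking search over bl's indices that prunes as soon as a position matches al, returning the lexicographically first (hence identical) assignment.
-- outside the precondition, e.g. on solve_comp(2, [5], [5, 5]): A returns ('No', []), B returns ('No', []); on solve_comp(2, [1], [2, 3]): A raises IndexError, B raises IndexError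
import Mathlib
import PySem

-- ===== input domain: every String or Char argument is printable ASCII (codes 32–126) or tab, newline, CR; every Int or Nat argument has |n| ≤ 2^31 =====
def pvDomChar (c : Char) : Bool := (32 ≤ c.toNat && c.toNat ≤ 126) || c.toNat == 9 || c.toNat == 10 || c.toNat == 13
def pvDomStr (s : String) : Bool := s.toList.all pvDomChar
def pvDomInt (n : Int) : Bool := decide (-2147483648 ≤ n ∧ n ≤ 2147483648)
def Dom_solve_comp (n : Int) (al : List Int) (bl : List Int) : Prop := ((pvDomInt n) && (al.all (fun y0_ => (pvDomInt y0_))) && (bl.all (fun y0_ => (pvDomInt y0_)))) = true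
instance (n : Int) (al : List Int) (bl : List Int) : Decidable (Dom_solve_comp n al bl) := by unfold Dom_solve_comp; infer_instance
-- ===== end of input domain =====

-- B replaces A's materialise-all-permutations-then-test loop by a backtracking search
-- over bl's indices that prunes a partial assignment as soon as a position matches al.

-- ===== PORT A =====
-- itertools.permutations(bl, n) yields the n-tuples of bl's elements taken at distinct
-- indices, in lexicographic order of the index sequences; ported as the list of index
-- permutations (in that order) mapped to values.
def idxPerms : Nat → List Nat → List (List Nat)
  | 0, _ => [[]]
  | k+1, avail => avail.flatMap (fun j => (idxPerms k (avail.erase j)).map (j :: ·))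

-- the inner 'for i in range(n): if al[i] == l[i]: break / else: return' check
def rowOK (al : List Int) (l : List Int) (k : Nat) : Bool :=
  (List.range k).all (fun i => !(al.getD i 0 == l.getD i 0))

def solve_comp (n : Int) (al : List Int) (bl : List Int) : String × List Int :=
  let perml := (idxPerms n.toNat (List.range bl.length)).map
    (fun idxs => idxs.map (fun j => bl.getD j 0))
  match perml.find? (fun l => rowOK al l n.toNat) with
  | some l => ("Yes", l)
  | none => ("No", [])

-- ===== PORT B =====
-- backtracking: at position i try bl's indices j in increasing order, skipping used
-- ones and those whose value equals al[i]; first complete assignment wins.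
def dfsGo (al bl : List Int) (i : Nat) (used : List Bool)
    (rec : List Bool → Option (List Int)) : List Nat → Option (List Int)
  | [] => none
  | j :: js' =>
    if !used.getD j false && !(bl.getD j 0 == al.getD i 0) then
      match rec (used.set j true) with
      | some rest => some (bl.getD j 0 :: rest)
      | none => dfsGo al bl i used rec js'
    else dfsGo al bl i used rec js'

def dfsB (al bl : List Int) : Nat → Nat → List Bool → Option (List Int)
  | 0, _, _ => some []
  | k+1, i, used => dfsGo al bl i used (dfsB al bl k (i+1)) (List.range bl.length)

def solve_comp_alt (n : Int) (al : List Int) (bl : List Int) : String × List Int :=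
  if (bl.length : Int) < n then ("No", [])
  else
    match dfsB al bl n.toNat 0 (List.replicate bl.length false) with
    | some acc => ("Yes", acc)
    | none => ("No", [])

-- ===== PRECONDITION & SPEC =====
-- Pre_ excludes n < 0 (permutations raises ValueError) and len(al) < n ≤ len(bl), where
-- A raises IndexError whenever some permutation's prefix avoids al entirely and otherwise
-- returns ('No', []) through early breaks (B agrees there too, but A's return is accidental).
def Pre_solve_comp (n : Int) (al : List Int) (bl : List Int) : Prop :=
  0 ≤ n ∧ (n ≤ (al.length : Int) ∨ (bl.length : Int) < n)
instance (n : Int) (al : List Int) (bl : List Int) : Decidable (Pre_solve_comp n al bl) := by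
  unfold Pre_solve_comp; infer_instance

def pvWitness_solve_comp : Int × List Int × List Int := (2, [1, 2], [2, 1])

def Spec_solve_comp (n : Int) (al : List Int) (bl : List Int) (out : String × List Int) : Prop := out = solve_comp_alt n al bl
instance (n : Int) (al : List Int) (bl : List Int) (out : String × List Int) : Decidable (Spec_solve_comp n al bl out) := by unfold Spec_solve_comp; infer_instance

-- ===== CLAIM (what is proved, stated in full; the proofs are below) =====
def Claim_equal_solve_comp : Prop := ∀ (n : Int) (al : List Int) (bl : List Int), Dom_solve_comp n al bl → Pre_solve_comp n al bl → Spec_solve_comp n al bl (solve_comp n al bl)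

-- ===== LEMMAS AND PROOFS =====

-- the common reference search over index lists
def okFrom (al bl : List Int) : Nat → List Nat → Bool
  | _, [] => true
  | i, j :: js => !(bl.getD j 0 == al.getD i 0) && okFrom al bl (i+1) js

def search (al bl : List Int) : Nat → Nat → List Nat → Option (List Nat)
  | 0, _, _ => some []
  | k+1, i, avail =>
    avail.findSome? (fun j =>
      if !(bl.getD j 0 == al.getD i 0) then
        (search al bl k (i+1) (avail.erase j)).map (j :: ·)
      else none)

def unusedIdxs (u : List Bool) : List Nat :=
  (List.range u.length).filter (fun j => !u.getD j false)

theorem find?_flatMap {α β : Type} (l : List α) (f : α → List β) (p : β → Bool) :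
    (l.flatMap f).find? p = l.findSome? (fun a => (f a).find? p) := by
  induction l with
  | nil => rfl
  | cons a l ih =>
    simp only [List.flatMap_cons, List.find?_append, List.findSome?_cons]
    cases h : (f a).find? p with
    | some b => simp
    | none => simp [ih]

theorem findSome?_congr_mem {α β : Type} (l : List α) (f g : α → Option β)
    (h : ∀ x ∈ l, f x = g x) : l.findSome? f = l.findSome? g := by
  induction l with
  | nil => rfl
  | cons a l ih =>
    simp only [List.findSome?_cons, h a (List.mem_cons_self ..)]
    cases g a with
    | some b => rfl
    | none => exact ih (fun x hx => h x (List.mem_cons_of_mem _ hx))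

theorem find?_congr_mem {α : Type} (l : List α) (p q : α → Bool)
    (h : ∀ x ∈ l, p x = q x) : l.find? p = l.find? q := by
  induction l with
  | nil => rfl
  | cons a l ih =>
    simp only [List.find?_cons, h a (List.mem_cons_self ..)]
    cases q a <;> simp [ih (fun x hx => h x (List.mem_cons_of_mem _ hx))]

theorem map_findSome? {α β γ : Type} (l : List α) (f : α → Option β) (g : β → γ) :
    (l.findSome? f).map g = l.findSome? (fun x => (f x).map g) := by
  induction l with
  | nil => rfl
  | cons a l ih =>
    simp only [List.findSome?_cons]
    cases f a <;> simp [ih]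

theorem mem_idxPerms_length (k : Nat) (avail : List Nat) (idxs : List Nat)
    (h : idxs ∈ idxPerms k avail) : idxs.length = k := by
  induction k generalizing avail idxs with
  | zero => simp [idxPerms] at h; simp [h]
  | succ k ih =>
    simp only [idxPerms, List.mem_flatMap, List.mem_map] at h
    obtain ⟨j, _, idxs', h1, h2⟩ := h
    subst h2
    simp [ih _ _ h1]

theorem idxPerms_eq_nil (k : Nat) (avail : List Nat) (h : avail.length < k) :
    idxPerms k avail = [] := by
  induction k generalizing avail with
  | zero => omega
  | succ k ih =>
    simp only [idxPerms]
    apply List.flatMap_eq_nil_iff.mpr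
    intro j hj
    rw [ih (avail.erase j) (by have := List.length_erase_add_one hj; omega)]
    rfl

theorem search_eq_find (al bl : List Int) (k : Nat) :
    ∀ (i : Nat) (avail : List Nat),
    search al bl k i avail = (idxPerms k avail).find? (okFrom al bl i) := by
  induction k with
  | zero => intro i avail; simp [search, idxPerms, okFrom]
  | succ k ih =>
    intro i avail
    simp only [search, idxPerms]
    rw [find?_flatMap]
    apply findSome?_congr_mem
    intro j hj
    rw [List.find?_map]
    have hok : ∀ idxs : List Nat, okFrom al bl i (j :: idxs)
        = (!(bl.getD j 0 == al.getD i 0) && okFrom al bl (i+1) idxs) := fun _ => rfl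
    by_cases hc : (bl.getD j 0 == al.getD i 0) = true
    · have hnone : ((idxPerms k (avail.erase j)).find? (okFrom al bl i ∘ (j :: ·))) = none := by
        apply List.find?_eq_none.mpr
        intro x hx
        simp only [Function.comp_apply, hok, hc, Bool.not_true, Bool.false_and]
        simp
      rw [if_neg (by rw [hc]; decide), hnone]
      rfl
    · have hc' : (!(bl.getD j 0 == al.getD i 0)) = true := by rw [Bool.eq_false_iff.mpr hc]; rfl
      rw [if_pos hc', ih]
      congr 1
      apply find?_congr_mem
      intro x hx
      simp only [Function.comp_apply, hok, hc', Bool.true_and]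

theorem filter_set_erase (p p' : Nat → Bool) (j : Nat) (hpj : p j = true)
    (hp'j : p' j = false) (hagree : ∀ t, t ≠ j → p' t = p t) :
    ∀ l : List Nat, l.Nodup → l.filter p' = (l.filter p).erase j := by
  intro l hl
  induction l with
  | nil => rfl
  | cons a l ih =>
    have hnd := (List.nodup_cons.mp hl).2
    have hna := (List.nodup_cons.mp hl).1
    by_cases ha : a = j
    · subst ha
      rw [List.filter_cons_of_pos hpj, List.filter_cons_of_neg (by simp [hp'j])]
      rw [List.erase_cons_head]
      rw [List.filter_congr (fun x hx => hagree x (fun h => hna (h ▸ hx)))]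
    · have hpa : p' a = p a := hagree a ha
      rcases h : p a with _ | _
      · rw [List.filter_cons_of_neg (by simp [hpa, h]), List.filter_cons_of_neg (by simp [h])]
        exact ih hnd
      · rw [List.filter_cons_of_pos (by simp [hpa, h]), List.filter_cons_of_pos (by simp [h])]
        rw [List.erase_cons_tail (by simpa using ha)]
        rw [ih hnd]

theorem getD_set_self (u : List Bool) (j : Nat) (hj : j < u.length) :
    (u.set j true).getD j false = true := by
  simp [List.getD_eq_getElem?_getD, hj]

theorem getD_set_ne' (u : List Bool) (j t : Nat) (h : t ≠ j) :
    (u.set j true).getD t false = u.getD t false := by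
  simp [List.getD_eq_getElem?_getD, Ne.symm h]

theorem unusedIdxs_set (u : List Bool) (j : Nat) (hj : j < u.length)
    (hu : u.getD j false = false) :
    unusedIdxs (u.set j true) = (unusedIdxs u).erase j := by
  unfold unusedIdxs
  rw [List.length_set]
  exact filter_set_erase (fun t => !u.getD t false) (fun t => !(u.set j true).getD t false) j
    (by show (!u.getD j false) = true; rw [hu]; rfl)
    (by show (!(u.set j true).getD j false) = false; rw [getD_set_self u j hj]; rfl)
    (fun t ht => by
      show (!(u.set j true).getD t false) = (!u.getD t false)
      rw [getD_set_ne' u j t ht])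
    (List.range u.length) (List.nodup_range)

theorem dfs_eq (al bl : List Int) (k : Nat) :
    ∀ (i : Nat) (u : List Bool), u.length = bl.length →
    dfsB al bl k i u
      = (search al bl k i (unusedIdxs u)).map (fun idxs => idxs.map (fun j => bl.getD j 0)) := by
  induction k with
  | zero => intro i u _; simp [dfsB, search]
  | succ k ih =>
    intro i u hu
    have go_eq : ∀ js : List Nat, (∀ j ∈ js, j < u.length) →
        dfsGo al bl i u (dfsB al bl k (i+1)) js
          = (js.filter (fun j => !u.getD j false)).findSome? (fun j =>
              if !(bl.getD j 0 == al.getD i 0) then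
                (search al bl k (i+1) ((unusedIdxs u).erase j)).map
                  (fun idxs => bl.getD j 0 :: idxs.map (fun j' => bl.getD j' 0))
              else none) := by
      intro js hjs
      induction js with
      | nil => rfl
      | cons j js' ihg =>
        have hjlt : j < u.length := hjs j (List.mem_cons_self ..)
        have ihg' := ihg (fun x hx => hjs x (List.mem_cons_of_mem _ hx))
        rcases hused : u.getD j false with _ | _
        · -- j unused
          rw [List.filter_cons_of_pos (by show (!u.getD j false) = true; rw [hused]; rfl), List.findSome?_cons]
          by_cases hc : (bl.getD j 0 == al.getD i 0) = true
          · have hcf : (!(bl.getD j 0 == al.getD i 0)) = false := by rw [hc]; rfl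
            simp only [dfsGo, hused, hcf, Bool.not_false, Bool.true_and,
              Bool.false_eq_true, if_false]
            rw [ihg']
          · have hc' : (!(bl.getD j 0 == al.getD i 0)) = true := by rw [Bool.eq_false_iff.mpr hc]; rfl
            simp only [dfsGo, hused, hc', Bool.not_false, Bool.true_and, if_true]
            rw [ih (i+1) (u.set j true) (by simp [hu]),
                unusedIdxs_set u j hjlt hused]
            cases hsr : search al bl k (i+1) ((unusedIdxs u).erase j) with
            | some idxs => simp
            | none => simp [ihg']
        · -- j already used
          rw [List.filter_cons_of_neg (by show ¬ (!u.getD j false) = true; rw [hused]; decide)]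
          simp only [dfsGo, hused]
          simpa using ihg'
    show dfsGo al bl i u (dfsB al bl k (i+1)) (List.range bl.length) = _
    rw [go_eq (List.range bl.length) (fun j hj => by rw [hu]; exact List.mem_range.mp hj)]
    have hfilter : (List.range bl.length).filter (fun j => !u.getD j false) = unusedIdxs u := by
      unfold unusedIdxs; rw [hu]
    rw [hfilter]
    show _ = (search al bl (k+1) i (unusedIdxs u)).map _
    simp only [search]
    rw [map_findSome?]
    apply findSome?_congr_mem
    intro j hj
    by_cases hc : (bl.getD j 0 == al.getD i 0) = true
    · have hcf : (!(bl.getD j 0 == al.getD i 0)) = false := by rw [hc]; rfl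
      rw [hcf]
      simp
    · have hc' : (!(bl.getD j 0 == al.getD i 0)) = true := by rw [Bool.eq_false_iff.mpr hc]; rfl
      rw [if_pos hc', if_pos hc', Option.map_map]
      rfl

theorem getD_replicate_false (m j : Nat) : (List.replicate m false).getD j false = false := by
  induction m generalizing j with
  | zero => simp
  | succ m ih =>
    cases j with
    | zero => rfl
    | succ j => simp only [List.replicate_succ, List.getD_cons_succ]; exact ih j

theorem unusedIdxs_replicate (m : Nat) : unusedIdxs (List.replicate m false) = List.range m := by
  unfold unusedIdxs
  rw [List.length_replicate]
  apply List.filter_eq_self.mpr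
  intro j _
  simp only [getD_replicate_false, Bool.not_false]

theorem beq_comm_int (a b : Int) : (a == b) = (b == a) := by
  by_cases h : a = b
  · subst h; rfl
  · rw [beq_eq_false_iff_ne.mpr h, beq_eq_false_iff_ne.mpr (Ne.symm h)]

theorem rowOK_shift (al bl : List Int) :
    ∀ (idxs : List Nat) (i : Nat),
    (List.range idxs.length).all
        (fun t => !(al.getD (i+t) 0 == ((idxs.map (fun j => bl.getD j 0)).getD t 0)))
      = okFrom al bl i idxs := by
  intro idxs
  induction idxs with
  | nil => intro i; rfl
  | cons j js ihr =>
    intro i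
    rw [List.length_cons, List.range_succ_eq_map, List.all_cons, List.all_map]
    have h1 : (fun t => !(al.getD (i+t) 0 == (((j::js).map (fun j' => bl.getD j' 0)).getD t 0))) ∘ Nat.succ
        = fun t => !(al.getD ((i+1)+t) 0 == ((js.map (fun j' => bl.getD j' 0)).getD t 0)) := by
      funext t
      have ht : i + Nat.succ t = i + 1 + t := by omega
      simp only [Function.comp_apply, List.map_cons, List.getD_cons_succ, ht]
    rw [h1, ihr (i+1)]
    simp only [okFrom]
    rw [beq_comm_int]
    simp only [List.map_cons, List.getD_cons_zero, Nat.add_zero]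

theorem solve_comp_eq_search (n : Int) (al bl : List Int) :
    solve_comp n al bl
      = match (search al bl n.toNat 0 (List.range bl.length)).map
          (fun idxs => idxs.map (fun j => bl.getD j 0)) with
        | some l => ("Yes", l)
        | none => ("No", []) := by
  simp only [solve_comp]
  rw [List.find?_map, search_eq_find]
  have : (idxPerms n.toNat (List.range bl.length)).find?
        ((fun l => rowOK al l n.toNat) ∘ (fun idxs => idxs.map (fun j => bl.getD j 0)))
      = (idxPerms n.toNat (List.range bl.length)).find? (okFrom al bl 0) := by
    apply find?_congr_mem
    intro idxs hmem
    have hlen := mem_idxPerms_length _ _ _ hmem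
    have := rowOK_shift al bl idxs 0
    simp only [Nat.zero_add] at this
    simp only [Function.comp, rowOK, ← hlen, this]
  rw [this]

-- ===== VERDICT (by name: the statement is the Claim_ definition above) =====
theorem solve_comp_spec : Claim_equal_solve_comp := by
  intro n al bl _ hpre
  unfold Spec_solve_comp
  obtain ⟨hn, _⟩ := hpre
  rw [solve_comp_eq_search]
  unfold solve_comp_alt
  by_cases hm : (bl.length : Int) < n
  · rw [if_pos hm]
    rw [search_eq_find, idxPerms_eq_nil _ _ (by rw [List.length_range]; omega)]
    rfl
  · rw [if_neg hm]
    rw [dfs_eq al bl n.toNat 0 (List.replicate bl.length false) (by simp),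
        unusedIdxs_replicate]
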